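-- pv_equiv track=rewrite | github.com/meglazero/CC-Statement-Manipulator | manipulator.py | parseArray
-- ===== SOURCE A (Python) =====
-- def parseArray(unparsedArray):
--     i=0
--     dollarSignAppearance=0
--     #lastSplitPoint=0
--     testList = []
--     lastTempSplitPoint=0
--     endOfEntry = 0
--     tempList = []
--     entryCount = 1
--
--     for x in unparsedArray:
--         if(x == "\n" and i == endOfEntry):
--             tempList.append(unparsedArray[lastTempSplitPoint:i])
--             entry = ",".join(tempList)
--             testList.append(entry)
--             tempList = []
--             lastTempSplitPoint = i+1
--             entryCount = 1
--         elif(x == "\n" or (x == " " and entryCount != 4)):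
--             tempList.append(unparsedArray[lastTempSplitPoint:i])
--             lastTempSplitPoint = i+1
--             entryCount += 1
--         elif(x == " " and entryCount == 4):
--             if(unparsedArray[i+1] == "$"):
--                 tempList.append(unparsedArray[lastTempSplitPoint:i])
--                 lastTempSplitPoint = i+1
--                 entryCount += 1
--         elif(i+1 == len(unparsedArray)):
--             tempList.append(unparsedArray[lastTempSplitPoint:i+1])
--             entry = ",".join(tempList)
--             testList.append(entry)
--         if (x == "$"):
--             endOfEntry = unparsedArray.find("\n", i)
--         i+=1
--
--     return testList
-- ===== SOURCE B (Python) =====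
-- def parseArray(unparsedArray):
--     s = unparsedArray
--     n = len(s)
--     out = []
--     cur = None          # entry assembled so far (pieces already joined with ","); None = no piece yet
--     buf = []            # characters of the current piece
--     count = 1
--     armed = False       # True once a "$" was seen: the next newline then closes the entry
--     for i, x in enumerate(s):
--         if x == "\n" and armed:
--             piece = "".join(buf)
--             out.append(piece if cur is None else cur + "," + piece)
--             cur = None
--             buf = []
--             count = 1
--         elif x == "\n" or (x == " " and count != 4):
--             piece = "".join(buf)
--             cur = piece if cur is None else cur + "," + piece
--             buf = []
--             count += 1
--         elif x == " " and count == 4: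
--             if i + 1 < n and s[i + 1] == "$":
--                 piece = "".join(buf)
--                 cur = piece if cur is None else cur + "," + piece
--                 buf = []
--                 count += 1
--             else:
--                 buf.append(x)
--         elif i + 1 == n:
--             buf.append(x)
--             piece = "".join(buf)
--             out.append(piece if cur is None else cur + "," + piece)
--         else:
--             buf.append(x)
--         if x == "$":
--             armed = True
--         elif x == "\n":
--             armed = False
--     return out
-- ===== Notes on version B (the rewrite author's own statement) =====
-- stated objective: alternative
-- what changed: B makes a single forward pass that builds each piece and entry incrementally (no slicing and no join) and replaces A's repeated find-next-newline rescans and stored endOfEntry index by a boolean armed flag set at '$' and cleared at a newline; Pre_ excludes strings ending in a space, on some of which A raises IndexError reading unparsedArray[i+1].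
-- intended difference: On strings whose first character is a newline, A flushes a spurious empty first entry (an accident of endOfEntry being initialised to 0), e.g. [''] on '\n'; B treats a leading newline uniformly as a field separator like every newline not following a '$' and returns [] there, which is the consistent behaviour. — e.g. on parseArray("\n"): A returns [""], B returns []
-- outside the precondition, e.g. on parseArray('ab '): A returns [], B returns []; on parseArray('a b c d '): A raises IndexError, B returns []; on parseArray('\n, '): A returns [''], B returns []
import Mathlib
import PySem

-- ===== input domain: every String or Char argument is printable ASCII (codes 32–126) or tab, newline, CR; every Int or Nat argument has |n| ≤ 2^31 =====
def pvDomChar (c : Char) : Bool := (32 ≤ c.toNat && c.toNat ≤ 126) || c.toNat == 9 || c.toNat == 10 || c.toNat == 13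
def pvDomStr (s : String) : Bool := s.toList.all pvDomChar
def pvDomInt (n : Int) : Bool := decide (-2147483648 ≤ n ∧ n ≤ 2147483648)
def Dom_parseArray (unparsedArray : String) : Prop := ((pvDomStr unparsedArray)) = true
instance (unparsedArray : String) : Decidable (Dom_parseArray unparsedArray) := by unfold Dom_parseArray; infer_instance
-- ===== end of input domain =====

-- B replaces A's repeated `find("\n", i)` scans and stored endOfEntry index by a single
-- pass with a boolean armed flag and an incrementally built current piece (objective: alternative).

-- ===== PORT A =====
-- literal port of A: fold over the characters with index i; tempList holds the slices,
-- endOfEntry is recomputed with find("\n", i) at every '$'.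
-- On inputs excluded by Pre_ (string ending in ' ') Python A may raise IndexError at
-- unparsedArray[i+1]; there pyGet? returns none and this port returns none too.
def parseArrayGo (cs : List Char) (rest : List Char) (i : Nat) (testList : List String)
    (tempList : List (List Char)) (lastTSP : Nat) (endOfEntry : Int) (entryCount : Int) :
    Option (List String) :=
  match rest with
  | [] => some testList
  | x :: rs =>
    let st? :
        Option (List String × List (List Char) × Nat × Int) :=
      if x = '\n' ∧ (i : Int) = endOfEntry then
        let piece := PySem.List.slice cs (some (lastTSP : Int)) (some (i : Int))
        let entry := PySem.Chars.join [','] (tempList ++ [piece])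
        some (testList ++ [String.ofList entry], [], i + 1, 1)
      else if x = '\n' ∨ (x = ' ' ∧ entryCount ≠ 4) then
        let piece := PySem.List.slice cs (some (lastTSP : Int)) (some (i : Int))
        some (testList, tempList ++ [piece], i + 1, entryCount + 1)
      else if x = ' ' ∧ entryCount = 4 then
        if PySem.List.pyGet? cs ((i : Int) + 1) = none then
          none    -- IndexError in Python A (these inputs are excluded by Pre_)
        else if PySem.List.pyGet? cs ((i : Int) + 1) = some '$' then
          let piece := PySem.List.slice cs (some (lastTSP : Int)) (some (i : Int))
          some (testList, tempList ++ [piece], i + 1, entryCount + 1)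
        else some (testList, tempList, lastTSP, entryCount)
      else if i + 1 = cs.length then
        let piece := PySem.List.slice cs (some (lastTSP : Int)) (some ((i : Int) + 1))
        let entry := PySem.Chars.join [','] (tempList ++ [piece])
        some (testList ++ [String.ofList entry], tempList ++ [piece], lastTSP, entryCount)
      else some (testList, tempList, lastTSP, entryCount)
    match st? with
    | none => none
    | some st =>
      let endOfEntry' := if x = '$' then PySem.Chars.findFrom cs ['\n'] (i : Int) none else endOfEntry
      parseArrayGo cs rs (i + 1) st.1 st.2.1 st.2.2.1 endOfEntry' st.2.2.2

def parseArray (unparsedArray : String) : List String :=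
  (parseArrayGo unparsedArray.toList unparsedArray.toList 0 [] [] 0 0 1).getD []

-- ===== PORT B =====
-- literal port of B: one pass; `cur` is the entry joined so far (none = no piece yet),
-- `buf` the characters of the current piece, `armed` is set at '$' and cleared at '\n'.
def pvJoinEntry (cur : Option (List Char)) (piece : List Char) : List Char :=
  match cur with
  | none => piece
  | some c => c ++ ',' :: piece

def parseArrayAltGo (cs : List Char) (rest : List Char) (i : Nat) (out : List String)
    (cur : Option (List Char)) (buf : List Char) (count : Int) (armed : Bool) :
    List String :=
  match rest with
  | [] => out
  | x :: rs =>
    let st :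
        List String × Option (List Char) × List Char × Int :=
      if x = '\n' ∧ armed then
        (out ++ [String.ofList (pvJoinEntry cur buf)], none, [], 1)
      else if x = '\n' ∨ (x = ' ' ∧ count ≠ 4) then
        (out, some (pvJoinEntry cur buf), [], count + 1)
      else if x = ' ' ∧ count = 4 then
        if i + 1 < cs.length ∧ PySem.List.pyGet? cs ((i : Int) + 1) = some '$' then
          (out, some (pvJoinEntry cur buf), [], count + 1)
        else (out, cur, buf ++ [x], count)
      else if i + 1 = cs.length then
        (out ++ [String.ofList (pvJoinEntry cur (buf ++ [x]))], cur, buf ++ [x], count)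
      else (out, cur, buf ++ [x], count)
    let armed' := if x = '$' then true else if x = '\n' then false else armed
    parseArrayAltGo cs rs (i + 1) st.1 st.2.1 st.2.2.1 st.2.2.2 armed'

def parseArray_alt (unparsedArray : String) : List String :=
  parseArrayAltGo unparsedArray.toList unparsedArray.toList 0 [] none [] 1 false

-- ===== PRECONDITION & SPEC =====
-- Pre_ excludes strings ending in a space: on some of those Python A raises IndexError
-- reading unparsedArray[i+1] past the end (namely when its entryCount is 4 at the final
-- space); the exact raising set depends on A's running state, so the whole (rare) class
-- of space-terminated strings is excluded, although on part of it A returns and B agrees.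
def Pre_parseArray (unparsedArray : String) : Prop :=
  PySem.Str.endswith unparsedArray " " = false
instance (unparsedArray : String) : Decidable (Pre_parseArray unparsedArray) := by
  unfold Pre_parseArray; infer_instance

def pvWitness_parseArray : String := "ab cd ef gh $5\n"

-- On strings whose first character is a newline, A flushes a spurious empty first entry
-- (an accident of endOfEntry being initialised to 0), e.g. [""] on "\n"; B treats a leading
-- newline uniformly as a field separator like every newline not following a '$' and
-- returns [] there, which is the consistent behaviour.
def D_parseArray (unparsedArray : String) : Prop :=
  unparsedArray.toList.head? = some '\n'
instance (unparsedArray : String) : Decidable (D_parseArray unparsedArray) := by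
  unfold D_parseArray; infer_instance

def Spec_parseArray (unparsedArray : String) (out : List String) : Prop :=
  ¬ D_parseArray unparsedArray → out = parseArray_alt unparsedArray
instance (unparsedArray : String) (out : List String) : Decidable (Spec_parseArray unparsedArray out) := by unfold Spec_parseArray; infer_instance

def pvDiffWitness_parseArray : String := "\n"
def pvDiffWitnessOut_parseArray : (List String) × (List String) := ([""], [])

-- ===== CLAIM (what is proved, stated in full; the proofs are below) =====
def Claim_unchanged_parseArray : Prop := ∀ (unparsedArray : String), Dom_parseArray unparsedArray → Pre_parseArray unparsedArray → Spec_parseArray unparsedArray (parseArray unparsedArray)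
def Claim_changed_parseArray : Prop := Dom_parseArray (pvDiffWitness_parseArray) ∧ Pre_parseArray (pvDiffWitness_parseArray) ∧ D_parseArray (pvDiffWitness_parseArray) ∧ parseArray (pvDiffWitness_parseArray) = pvDiffWitnessOut_parseArray.1 ∧ parseArray_alt (pvDiffWitness_parseArray) = pvDiffWitnessOut_parseArray.2 ∧ pvDiffWitnessOut_parseArray.1 ≠ pvDiffWitnessOut_parseArray.2

-- ===== LEMMAS AND PROOFS =====

-- join of an appended piece, expressed through pvJoinEntry
theorem pv_join_append (tmp : List (List Char)) (p : List Char) :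
    PySem.Chars.join [','] (tmp ++ [p]) =
      pvJoinEntry (if tmp = [] then none else some (PySem.Chars.join [','] tmp)) p := by
  induction tmp with
  | nil => simp [pvJoinEntry, PySem.Chars.join_singleton]
  | cons a t ih =>
    cases t with
    | nil =>
      simp [pvJoinEntry, PySem.Chars.join_singleton, PySem.Chars.join_cons_cons]
    | cons b t' =>
      simp only [List.cons_append, PySem.Chars.join_cons_cons] at *
      simp only [pvJoinEntry, reduceCtorEq, List.append_assoc] at *
      simp [ih]

-- find of a single character is findIdx (when present) / -1 (when absent)
theorem pv_find_singleton (cs : List Char) (c : Char) :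
    PySem.Chars.find cs [c] =
      if c ∈ cs then (cs.findIdx (· == c) : Int) else -1 := by
  by_cases h : c ∈ cs
  · simp only [h, if_true]
    have hinf : [c] <:+: cs := (List.singleton_infix_iff c cs).mpr h
    have hnn : 0 ≤ PySem.Chars.find cs [c] := (PySem.Chars.find_nonneg_iff cs [c]).2 hinf
    obtain ⟨hpre, hmin⟩ := PySem.Chars.find_spec hnn
    have hlt : (PySem.Chars.find cs [c]).toNat < cs.length := by
      have hle := PySem.Chars.find_le_length cs [c]
      rcases Nat.lt_or_ge (PySem.Chars.find cs [c]).toNat cs.length with h' | h'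
      · exact h'
      · exfalso
        have : cs.drop (PySem.Chars.find cs [c]).toNat = [] := List.drop_eq_nil_of_le h'
        rw [this] at hpre
        exact (List.cons_ne_nil c []) (List.prefix_nil.mp hpre)
    have hget : cs[(PySem.Chars.find cs [c]).toNat] = c := by
      obtain ⟨t, ht⟩ := hpre
      have h0 : (cs.drop (PySem.Chars.find cs [c]).toNat)[0]? = some c := by rw [← ht]; simp
      simp [List.getElem?_drop, List.getElem?_eq_getElem hlt] at h0
      exact h0
    have : cs.findIdx (· == c) = (PySem.Chars.find cs [c]).toNat := by
      rw [List.findIdx_eq hlt]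
      refine ⟨by simp [hget], ?_⟩
      intro j hj
      have hj' : j < cs.length := lt_trans hj hlt
      simp only [beq_eq_false_iff_ne, ne_eq]
      intro hc
      apply hmin j hj
      rw [List.drop_eq_getElem_cons hj', hc]
      exact ⟨_, rfl⟩
    omega
  · simp only [h, if_false]
    apply (PySem.Chars.find_eq_neg_one_iff cs [c]).2
    intro hinf
    exact h (hinf.mem (by simp))

-- one step of A's endOfEntry update, expressed on the remaining suffix
theorem pv_findFrom_step (cs rs : List Char) (x : Char) (i : Nat)
    (hdrop : x :: rs = cs.drop i) (hx : x ≠ '\n') :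
    PySem.Chars.findFrom cs ['\n'] (i : Int) none =
      (if '\n' ∈ rs then ((i : Int) + 1) + rs.findIdx (· == '\n') else -1) := by
  have hi : i ≤ cs.length := by
    by_contra h
    rw [List.drop_eq_nil_of_le (Nat.le_of_not_lt (by omega))] at hdrop
    exact List.cons_ne_nil x rs hdrop
  rw [PySem.Chars.findFrom_natCast cs ['\n'] i hi, ← hdrop,
    pv_find_singleton (x :: rs) '\n']
  have hmem : ('\n' ∈ x :: rs) = ('\n' ∈ rs) := by simp [List.mem_cons, Ne.symm hx]
  by_cases h : '\n' ∈ rs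
  · have hfi : (x :: rs).findIdx (· == '\n') = rs.findIdx (· == '\n') + 1 := by
      have hxb : (x == '\n') = false := by simp [hx]
      simp [List.findIdx_cons, hxb]
    simp only [hmem, h, if_true, hfi]
    have hne : ((rs.findIdx (· == '\n') + 1 : Nat) : Int) ≠ -1 := by omega
    simp only [hne, ite_false]
    push_cast
    ring
  · simp [hmem, h]

-- extending the current piece by one character
theorem pv_buf_step (cs rs : List Char) (x : Char) (i l : Nat)
    (hdrop : x :: rs = cs.drop i) (hl : l ≤ i) :
    (cs.drop l).take (i + 1 - l) = (cs.drop l).take (i - l) ++ [x] := by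
  have hi : i < cs.length := by
    by_contra h
    rw [List.drop_eq_nil_of_le (Nat.le_of_not_lt h)] at hdrop
    exact List.cons_ne_nil x rs hdrop
  have hget : (cs.drop l)[i - l]? = some x := by
    rw [List.getElem?_drop]
    have : l + (i - l) = i := by omega
    rw [this, List.getElem?_eq_getElem hi]
    have hcons := List.drop_eq_getElem_cons hi
    rw [← hdrop] at hcons
    exact congrArg some (List.cons.inj hcons).1.symm
  have : i + 1 - l = (i - l) + 1 := by omega
  rw [this, List.take_add_one, hget]
  rfl

-- the "armed"/endOfEntry invariants step for a character that is neither '\n' nor '$'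
theorem pv_arm_step (rs : List Char) (x : Char) (i : Nat) (eoe : Int) (armed : Bool)
    (hnl : x ≠ '\n')
    (harm : armed = true →
      0 < i ∧ eoe = (if '\n' ∈ x :: rs then (i : Int) + (x :: rs).findIdx (· == '\n') else -1))
    (hunarm : armed = false → '\n' ∈ x :: rs →
      (eoe < (i : Int) ∨ (i = 0 ∧ eoe = 0 ∧ ∀ t, x :: rs ≠ '\n' :: t))) :
    (armed = true →
      0 < i + 1 ∧ eoe = (if '\n' ∈ rs then ((i + 1 : Nat) : Int) + rs.findIdx (· == '\n') else -1))
    ∧ (armed = false → '\n' ∈ rs →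
      (eoe < ((i + 1 : Nat) : Int) ∨ (i + 1 = 0 ∧ eoe = 0 ∧ ∀ t, rs ≠ '\n' :: t))) := by
  have hmem : ('\n' ∈ x :: rs) ↔ ('\n' ∈ rs) := by simp [List.mem_cons, Ne.symm hnl]
  have hxb : (x == '\n') = false := by simp [hnl]
  have hfi : (x :: rs).findIdx (· == '\n') = rs.findIdx (· == '\n') + 1 := by
    simp [List.findIdx_cons, hxb]
  constructor
  · intro ha
    obtain ⟨hpos, he⟩ := harm ha
    refine ⟨by omega, ?_⟩
    rw [he]
    by_cases hm : '\n' ∈ rs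
    · simp only [hmem.mpr hm, hm, if_true, hfi]
      push_cast
      ring
    · simp [hmem, hm]
  · intro ha hm
    rcases hunarm ha (hmem.mpr hm) with h | ⟨h0, he, _⟩
    · left; push_cast; omega
    · left; push_cast; omega

-- the invariant relating A's state to B's state, and the main simulation lemma
theorem pv_go_eq (cs : List Char) (rest : List Char) (hpre : ¬ ([' '] <:+ cs)) :
    ∀ (i lastTSP : Nat) (eoe cnt : Int) (out : List String)
      (tmp : List (List Char)) (cur : Option (List Char)) (buf : List Char) (armed : Bool),
      rest = cs.drop i →
      lastTSP ≤ i →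
      buf = (cs.drop lastTSP).take (i - lastTSP) →
      cur = (if tmp = [] then none else some (PySem.Chars.join [','] tmp)) →
      (armed = true →
        0 < i ∧
          eoe = (if '\n' ∈ rest then (i : Int) + rest.findIdx (· == '\n') else -1)) →
      (armed = false → '\n' ∈ rest →
        (eoe < (i : Int) ∨ (i = 0 ∧ eoe = 0 ∧ ∀ t, rest ≠ '\n' :: t))) →
      parseArrayGo cs rest i out tmp lastTSP eoe cnt =
        some (parseArrayAltGo cs rest i out cur buf cnt armed) := by
  induction rest with
  | nil => intros; simp [parseArrayGo, parseArrayAltGo]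
  | cons x rs ih =>
    intro i lastTSP eoe cnt out tmp cur buf armed hdrop hle hbuf hcur harm hunarm
    have hi : i < cs.length := by
      by_contra h
      rw [List.drop_eq_nil_of_le (Nat.le_of_not_lt h)] at hdrop
      exact List.cons_ne_nil x rs hdrop
    have hcons := List.drop_eq_getElem_cons hi
    rw [← hdrop] at hcons
    obtain ⟨hx, hrs⟩ := List.cons.inj hcons
    have hpiece : PySem.List.slice cs (some (lastTSP : Int)) (some (i : Int)) = buf := by
      rw [PySem.List.slice_natCast]; exact hbuf.symm
    have hentry : ∀ p, PySem.Chars.join [','] (tmp ++ [p]) = pvJoinEntry cur p := by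
      intro p; rw [pv_join_append, ← hcur]
    have hbufx : (cs.drop lastTSP).take (i + 1 - lastTSP) = buf ++ [x] := by
      rw [pv_buf_step cs rs x i lastTSP hdrop hle, ← hbuf]
    have hcast : ((i : Int) + 1) = ((i + 1 : Nat) : Int) := by push_cast; ring
    simp only [parseArrayGo, parseArrayAltGo]
    by_cases hnl : x = '\n'
    · subst hnl
      by_cases ha : armed = true
      · -- both flush the entry
        have heoe : (i : Int) = eoe := by
          obtain ⟨hpos, he⟩ := harm ha
          rw [he]
          simp [List.mem_cons, List.findIdx_cons]
        subst ha
        have c1 : ('\n' = '\n' ∧ (i : Int) = eoe) := ⟨rfl, heoe⟩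
        have c2 : ('\n' = '\n' ∧ (true : Bool) = true) := ⟨rfl, rfl⟩
        rw [if_pos c1, if_pos c2, hpiece, hentry buf]
        refine ih (i + 1) (i + 1) eoe 1 _ [] none [] false hrs (le_refl _) (by simp)
          (by simp) (by simp) ?_
        intro _ _
        left
        push_cast
        omega
      · -- A does not flush: endOfEntry is stale (or 0 at a non-newline start)
        have ha' : armed = false := by simpa using ha
        have hlt : eoe < (i : Int) := by
          rcases hunarm ha' (by simp) with h | ⟨h0, he, hhd⟩
          · exact h
          · exact absurd rfl (hhd rs)
        have hne : ¬ ((i : Int) = eoe) := by omega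
        rw [if_neg (show ¬ ('\n' = '\n' ∧ (i : Int) = eoe) from fun h => hne h.2),
          if_neg (show ¬ ('\n' = '\n' ∧ armed = true) from fun h => ha h.2),
          if_pos (Or.inl rfl : '\n' = '\n' ∨ ('\n' = ' ' ∧ cnt ≠ 4)),
          if_pos (Or.inl rfl : '\n' = '\n' ∨ ('\n' = ' ' ∧ cnt ≠ 4)), hpiece]
        refine ih (i + 1) (i + 1) eoe (cnt + 1) _ (tmp ++ [buf]) _ [] false hrs (le_refl _)
          (by simp) (by simp [pv_join_append, ← hcur]) (by simp) ?_
        intro _ _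
        left
        push_cast
        omega
    · -- x is not a newline
      rw [if_neg (show ¬ (x = '\n' ∧ (i : Int) = eoe) from fun h => hnl h.1),
        if_neg (show ¬ (x = '\n' ∧ armed = true) from fun h => hnl h.1)]
      by_cases hdol : x = '$'
      · -- '$' re-arms; it is neither '\n' nor ' ', so only the last-character branch can act
        subst hdol
        rw [if_neg (by simp : ¬ ('$' = '\n' ∨ ('$' = ' ' ∧ cnt ≠ 4))),
          if_neg (by simp : ¬ ('$' = '\n' ∨ ('$' = ' ' ∧ cnt ≠ 4))),
          if_neg (by simp : ¬ ('$' = ' ' ∧ cnt = 4)),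
          if_neg (by simp : ¬ ('$' = ' ' ∧ cnt = 4))]
        by_cases hlast : i + 1 = cs.length
        · have hrs0 : rs = [] := by
            rw [hrs]
            exact List.drop_eq_nil_of_le (by omega)
          subst hrs0
          rw [if_pos hlast, if_pos hlast]
          simp only [parseArrayGo, parseArrayAltGo]
          rw [hcast, PySem.List.slice_natCast, hbufx, hentry (buf ++ ['$'])]
        · rw [if_neg hlast, if_neg hlast]
          refine ih (i + 1) lastTSP (PySem.Chars.findFrom cs ['\n'] (i : Int) none) cnt _
            tmp cur (buf ++ ['$']) true hrs (by omega) (by rw [hbufx]) hcur ?_ (by simp)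
          intro _
          refine ⟨by omega, ?_⟩
          rw [pv_findFrom_step cs rs '$' i hdrop (by decide)]
          by_cases hm : '\n' ∈ rs
          · simp only [hm, if_true]
            push_cast
            ring
          · simp [hm]
      · -- ordinary character (not '\n', not '$'): armed and endOfEntry both stay
        have hAS := pv_arm_step rs x i eoe armed hnl harm hunarm
        have harm' : (if x = '$' then true else if x = '\n' then false else armed)
            = armed := by
          simp [hdol, hnl]
        have heoe' : (if x = '$' then PySem.Chars.findFrom cs ['\n'] (i : Int) none else eoe)
            = eoe := by simp [hdol]
        rw [harm', heoe']
        by_cases hsp : x = ' '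
        · subst hsp
          by_cases hc4 : cnt = 4
          · rw [if_neg (by simp [hc4] : ¬ (' ' = '\n' ∨ (' ' = ' ' ∧ cnt ≠ 4))),
              if_neg (by simp [hc4] : ¬ (' ' = '\n' ∨ (' ' = ' ' ∧ cnt ≠ 4))),
              if_pos (⟨rfl, hc4⟩ : (' ' = ' ' ∧ cnt = 4)),
              if_pos (⟨rfl, hc4⟩ : (' ' = ' ' ∧ cnt = 4))]
            by_cases hn : PySem.List.pyGet? cs ((i : Int) + 1) = none
            · -- Python A raises IndexError here: impossible under Pre_
              exfalso
              rw [hcast, PySem.List.pyGet?_natCast] at hn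
              have hlen2 : cs.length ≤ i + 1 := List.getElem?_eq_none_iff.mp hn
              have hdropi : cs.drop i = [' '] := by
                rw [List.drop_eq_getElem_cons hi, ← hx,
                  List.drop_eq_nil_of_le (by omega : cs.length ≤ i + 1)]
              exact hpre ⟨cs.take i, by rw [← hdropi]; exact List.take_append_drop i cs⟩
            · rw [if_neg hn]
              by_cases hget : PySem.List.pyGet? cs ((i : Int) + 1) = some '$'
              · have hlen : i + 1 < cs.length := by
                  have hc' := hget
                  rw [hcast, PySem.List.pyGet?_natCast] at hc'
                  exact (List.getElem?_eq_some_iff.mp hc').1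
                rw [if_pos hget, if_pos (⟨hlen, hget⟩ :
                  i + 1 < cs.length ∧ PySem.List.pyGet? cs ((i : Int) + 1) = some '$'), hpiece]
                exact ih (i + 1) (i + 1) eoe (cnt + 1) _ (tmp ++ [buf]) _ [] _ hrs (le_refl _)
                  (by simp) (by simp [pv_join_append, ← hcur]) hAS.1 hAS.2
              · rw [if_neg hget, if_neg (fun h => hget h.2)]
                exact ih (i + 1) lastTSP eoe cnt _ tmp cur (buf ++ [' ']) _ hrs (by omega)
                  hbufx.symm hcur hAS.1 hAS.2
          · rw [if_pos (Or.inr ⟨rfl, hc4⟩ : ' ' = '\n' ∨ (' ' = ' ' ∧ cnt ≠ 4)),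
              if_pos (Or.inr ⟨rfl, hc4⟩ : ' ' = '\n' ∨ (' ' = ' ' ∧ cnt ≠ 4)), hpiece]
            exact ih (i + 1) (i + 1) eoe (cnt + 1) _ (tmp ++ [buf]) _ [] _ hrs (le_refl _)
              (by simp) (by simp [pv_join_append, ← hcur]) hAS.1 hAS.2
        · -- neither '\n' nor ' ' nor '$'
          rw [if_neg (by simp [hnl, hsp] : ¬ (x = '\n' ∨ (x = ' ' ∧ cnt ≠ 4))),
            if_neg (by simp [hnl, hsp] : ¬ (x = '\n' ∨ (x = ' ' ∧ cnt ≠ 4))),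
            if_neg (show ¬ (x = ' ' ∧ cnt = 4) from fun h => hsp h.1),
            if_neg (show ¬ (x = ' ' ∧ cnt = 4) from fun h => hsp h.1)]
          by_cases hlast : i + 1 = cs.length
          · have hrs0 : rs = [] := by
              rw [hrs]
              exact List.drop_eq_nil_of_le (by omega)
            subst hrs0
            rw [if_pos hlast, if_pos hlast]
            simp only [parseArrayGo, parseArrayAltGo]
            rw [hcast, PySem.List.slice_natCast, hbufx, hentry (buf ++ [x])]
          · rw [if_neg hlast, if_neg hlast]
            exact ih (i + 1) lastTSP eoe cnt _ tmp cur (buf ++ [x]) _ hrs (by omega)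
              hbufx.symm hcur hAS.1 hAS.2

-- ===== VERDICT (by name: the statements are the Claim_ definitions above) =====
theorem parseArray_spec : Claim_unchanged_parseArray := by
  intro s _ hpre hD
  unfold parseArray parseArray_alt
  have hp : ¬ ([' '] <:+ s.toList) := by
    unfold Pre_parseArray at hpre
    intro hs
    rw [PySem.Str.endswith_eq] at hpre
    rw [show (" " : String).toList = [' '] from rfl,
      (PySem.Chars.endswith_iff s.toList [' ']).mpr hs] at hpre
    exact Bool.true_eq_false.mp hpre
  have hhd : ∀ t, s.toList ≠ '\n' :: t := by
    intro t ht
    apply hD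
    unfold D_parseArray
    rw [ht]
    rfl
  rw [pv_go_eq s.toList s.toList hp 0 0 0 1 [] [] none [] false rfl (le_refl 0) (by simp)
    (by simp) (by simp) (fun _ _ => Or.inr ⟨rfl, rfl, hhd⟩)]
  rfl

theorem parseArray_changed : Claim_changed_parseArray := by
  unfold Claim_changed_parseArray; decide
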